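-- pv_equiv track=rewrite | github.com/danhdoan/project-euler | solutions/p46_goldbachs_other_conjecture.py | check
-- ===== SOURCE A (Python) =====
-- def is_prime(x):
--     i = 2
--     while i*i <= x:
--         if x % i == 0:
--             return False
--         i += 1
--     return x > 1
--
-- def check(x):
--     i = 0
--     while i*i*2 < x:
--         p = x - 2*i*i
--         if is_prime(p):
--             return True
--
--         i += 1
--     return False
-- ===== SOURCE B (Python) =====
-- def check(x):
--     # Does x = prime + 2*square?  Precompute the primes up to isqrt(x) once,
--     # then test each candidate x - 2*i*i by trial division by those primes only.
--     if x <= 0: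
--         return False
--     limit = 1
--     while (limit + 1) * (limit + 1) <= x:
--         limit += 1          # limit = isqrt(x)
--
--     def no_factor_in(primes, n):
--         for p in primes:
--             if p * p > n:
--                 return True
--             if n % p == 0:
--                 return False
--         return True
--
--     primes = []
--     for q in range(2, limit + 1):
--         if no_factor_in(primes, q):
--             primes.append(q)
--
--     i = 0
--     while 2 * i * i < x:
--         cand = x - 2 * i * i
--         if cand > 1 and no_factor_in(primes, cand):
--             return True
--         i += 1
--     return False
-- ===== Notes on version B (the rewrite author's own statement) =====
-- stated objective: alternative
-- what changed: B precomputes the list of primes up to isqrt(x) once (incremental trial division against the growing prime table) and tests each candidate x - 2*i*i by dividing only by those tabulated primes, instead of A's fresh trial division by every integer from 2 for each candidate.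
import Mathlib
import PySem

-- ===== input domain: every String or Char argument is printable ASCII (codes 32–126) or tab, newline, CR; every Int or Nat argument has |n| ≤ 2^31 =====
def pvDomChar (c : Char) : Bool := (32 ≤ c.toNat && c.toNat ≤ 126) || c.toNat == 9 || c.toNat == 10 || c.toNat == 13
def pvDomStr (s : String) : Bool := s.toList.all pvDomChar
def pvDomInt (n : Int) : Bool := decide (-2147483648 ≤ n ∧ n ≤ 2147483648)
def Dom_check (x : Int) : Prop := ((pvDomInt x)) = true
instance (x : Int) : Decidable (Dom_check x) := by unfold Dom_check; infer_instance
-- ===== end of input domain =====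

-- B precomputes the primes up to isqrt(x) once and trial-divides each candidate
-- x - 2*i*i by that prime table only (alternative decomposition, same result).

-- ===== PORT A =====
-- while i*i <= x: if x % i == 0: return False; i += 1 — then return x > 1
-- (fuel = the loop's decreasing measure (x+1-i).toNat; it is adequate, see isPrimeAux_true_iff_aux)
def isPrimeAux : Nat → Int → Int → Bool
  | 0, x, _ => decide (1 < x)
  | Nat.succ f, x, i =>
    if i * i ≤ x then
      if PySem.Int.mod x i == 0 then false else isPrimeAux f x (i + 1)
    else decide (1 < x)

def is_prime (x : Int) : Bool := isPrimeAux (x + 1 - 2).toNat x 2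

-- while i*i*2 < x: p = x - 2*i*i; if is_prime(p): return True; i += 1 — return False
def checkAux : Nat → Int → Int → Bool
  | 0, _, _ => false
  | Nat.succ f, x, i =>
    if i * i * 2 < x then
      if is_prime (x - 2 * i * i) then true else checkAux f x (i + 1)
    else false

def check (x : Int) : Bool := checkAux x.toNat x 0

-- ===== PORT B =====
-- limit = 1; while (limit+1)*(limit+1) <= x: limit += 1      (integer sqrt)
def sqrtLoop : Nat → Int → Int → Int
  | 0, _, limit => limit
  | Nat.succ f, x, limit =>
    if (limit + 1) * (limit + 1) ≤ x then sqrtLoop f x (limit + 1) else limit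

-- def no_factor_in(primes, n): for p in primes: break on p*p>n / factor; else True
def noFactorIn (primes : List Int) (n : Int) : Bool :=
  match primes with
  | [] => true
  | p :: rest =>
    if p * p > n then true
    else if PySem.Int.mod n p == 0 then false
    else noFactorIn rest n

-- for q in range(2, limit+1): if no_factor_in(primes, q): primes.append(q)
def stepPrime (ps : List Int) (q : Int) : List Int :=
  if noFactorIn ps q then ps ++ [q] else ps

def buildPrimes (limit : Int) : List Int :=
  (PySem.List.pyRange 2 (limit + 1) 1).foldl stepPrime []

-- while 2*i*i < x: cand = x - 2*i*i; if cand > 1 and no_factor_in(primes, cand): True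
def checkAltAux : Nat → Int → List Int → Int → Bool
  | 0, _, _, _ => false
  | Nat.succ f, x, primes, i =>
    if 2 * i * i < x then
      if x - 2 * i * i > 1 && noFactorIn primes (x - 2 * i * i) then true
      else checkAltAux f x primes (i + 1)
    else false

def check_alt (x : Int) : Bool :=
  if x ≤ 0 then false
  else checkAltAux x.toNat x (buildPrimes (sqrtLoop (x - 1).toNat x 1)) 0

-- ===== PRECONDITION & SPEC =====
def Spec_check (x : Int) (out : Bool) : Prop := out = check_alt x
instance (x : Int) (out : Bool) : Decidable (Spec_check x out) := by unfold Spec_check; infer_instance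

-- ===== CLAIM (what is proved, stated in full; the proofs are below) =====
def Claim_equal_check : Prop := ∀ (x : Int), Dom_check x → Spec_check x (check x)

-- ===== LEMMAS AND PROOFS =====

-- n is detected as prime by trial division (the shared mathematical spec)
def PrimeLike (n : Int) : Prop := 1 < n ∧ ∀ d : Int, 2 ≤ d → d * d ≤ n → ¬ d ∣ n

-- ps is exactly the increasing list of PrimeLike numbers below b
def GoodPrimes (ps : List Int) (b : Int) : Prop :=
  ps.Pairwise (· < ·) ∧ ∀ p : Int, p ∈ ps ↔ (PrimeLike p ∧ p < b)

theorem isPrimeAux_true_iff_aux : ∀ (f : Nat) (x i : Int), (x + 1 - i).toNat ≤ f → 2 ≤ i →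
    (isPrimeAux f x i = true ↔ (1 < x ∧ ∀ d : Int, i ≤ d → d * d ≤ x → ¬ d ∣ x)) := by
  intro f
  induction f with
  | zero =>
    intro x i hf hi
    simp only [isPrimeAux, decide_eq_true_eq]
    constructor
    · intro h1
      refine ⟨h1, fun d hd hdd hddvd => ?_⟩
      have hxi : x < i := by omega
      have hd2 : 2 ≤ d := by omega
      have h2d : 2 * d ≤ d * d := by nlinarith
      linarith
    · exact fun hh => hh.1
  | succ f ih =>
    intro x i hf hi
    simp only [isPrimeAux]
    by_cases h : i * i ≤ x
    · rw [if_pos h]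
      have hix : 2 * i ≤ x + 1 := by nlinarith [mul_self_nonneg (i - 1)]
      have hx0 : 0 ≤ x := le_trans (mul_self_nonneg i) h
      by_cases hmod : PySem.Int.mod x i = 0
      · have hdvd : i ∣ x := (PySem.Int.mod_eq_zero_iff_dvd x i).mp hmod
        rw [if_pos (by simp [hmod])]
        simp only [Bool.false_eq_true, false_iff]
        rintro ⟨-, hall⟩
        exact hall i le_rfl h hdvd
      · have hndvd : ¬ i ∣ x := fun hd => hmod ((PySem.Int.mod_eq_zero_iff_dvd x i).mpr hd)
        rw [if_neg (by simpa using hmod)]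
        rw [ih x (i + 1) (by omega) (by omega)]
        constructor
        · rintro ⟨h1, hall⟩
          refine ⟨h1, fun d hd hdd hddvd => ?_⟩
          rcases eq_or_lt_of_le hd with heq | hlt
          · exact hndvd (heq ▸ hddvd)
          · exact hall d (by omega) hdd hddvd
        · rintro ⟨h1, hall⟩
          exact ⟨h1, fun d hd hdd hddvd => hall d (by omega) hdd hddvd⟩
    · rw [if_neg h]
      simp only [decide_eq_true_eq]
      constructor
      · intro h1
        refine ⟨h1, fun d hd hdd hddvd => ?_⟩
        have : i * i ≤ d * d := by nlinarith
        exact h (le_trans this hdd)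
      · exact fun hh => hh.1

theorem is_prime_true_iff (n : Int) : is_prime n = true ↔ PrimeLike n := by
  unfold is_prime PrimeLike
  exact isPrimeAux_true_iff_aux (n + 1 - 2).toNat n 2 le_rfl (by omega)

theorem exists_primelike_factor (n d : Int) (hn : 1 < n) (hd2 : 2 ≤ d)
    (hdd : d * d ≤ n) (hdvd : d ∣ n) :
    ∃ p : Int, PrimeLike p ∧ p * p ≤ n ∧ p ∣ n := by
  have hmn : ((n.toNat : Int)) = n := Int.toNat_of_nonneg (by omega)
  have hdn : ((d.toNat : Int)) = d := Int.toNat_of_nonneg (by omega)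
  have hdm : d.toNat ∣ n.toNat := by
    rw [← Int.natCast_dvd_natCast, hmn, hdn]; exact hdvd
  have hd2' : 2 ≤ d.toNat := by omega
  have hm1 : n.toNat ≠ 1 := by omega
  have hp : (n.toNat.minFac).Prime := Nat.minFac_prime hm1
  have hple : n.toNat.minFac ≤ d.toNat := Nat.minFac_le_of_dvd hd2' hdm
  have hpdvd : n.toNat.minFac ∣ n.toNat := Nat.minFac_dvd _
  have hp2 : 2 ≤ ((n.toNat.minFac : Int)) := by exact_mod_cast hp.two_le
  refine ⟨(n.toNat.minFac : Int), ⟨by omega, ?_⟩, ?_, ?_⟩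
  · intro e he hee hedvd
    have hpe : 0 < ((n.toNat.minFac : Int)) := by omega
    have hele : e ≤ ((n.toNat.minFac : Int)) := Int.le_of_dvd hpe hedvd
    have hedvd' : e.toNat ∣ n.toNat.minFac := by
      rw [← Int.natCast_dvd_natCast, Int.toNat_of_nonneg (by omega : (0:Int) ≤ e)]
      exact hedvd
    rcases hp.eq_one_or_self_of_dvd e.toNat hedvd' with h1 | h2
    · omega
    · have : e = ((n.toNat.minFac : Int)) := by omega
      nlinarith
  · have hled : ((n.toNat.minFac : Int)) ≤ d := by omega
    nlinarith
  · rw [← hmn, Int.natCast_dvd_natCast]; exact hpdvd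

theorem noFactorIn_true_iff (ps : List Int) (n : Int)
    (h2 : ∀ p ∈ ps, 2 ≤ p) (hs : ps.Pairwise (· ≤ ·)) :
    noFactorIn ps n = true ↔ ∀ p ∈ ps, p * p ≤ n → ¬ p ∣ n := by
  induction ps with
  | nil => simp [noFactorIn]
  | cons p rest ih =>
    rw [List.pairwise_cons] at hs
    have hp2 : 2 ≤ p := h2 p (List.mem_cons_self ..)
    by_cases hpn : p * p > n
    · rw [noFactorIn, if_pos hpn]
      simp only [true_iff]
      intro q hq hqq
      exfalso
      rcases List.mem_cons.mp hq with rfl | hq'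
      · exact absurd hqq (not_le.mpr hpn)
      · have hpq : p ≤ q := hs.1 q hq'
        have hle : p * p ≤ q * q := by nlinarith
        linarith
    · rw [noFactorIn, if_neg hpn]
      by_cases hmod : PySem.Int.mod n p = 0
      · have hdvd : p ∣ n := (PySem.Int.mod_eq_zero_iff_dvd n p).mp hmod
        rw [if_pos (by simp [hmod])]
        simp only [Bool.false_eq_true, false_iff]
        intro hall
        exact hall p (List.mem_cons_self ..) (not_lt.mp hpn) hdvd
      · have hndvd : ¬ p ∣ n := fun hd => hmod ((PySem.Int.mod_eq_zero_iff_dvd n p).mpr hd)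
        rw [if_neg (by simpa using hmod)]
        rw [ih (fun q hq => h2 q (List.mem_cons_of_mem p hq)) hs.2]
        constructor
        · intro hall q hq hqq
          rcases List.mem_cons.mp hq with rfl | hq'
          · exact hndvd
          · exact hall q hq' hqq
        · intro hall q hq hqq
          exact hall q (List.mem_cons_of_mem p hq) hqq

theorem noFactorIn_iff_primeLike (ps : List Int) (m n : Int)
    (hg : GoodPrimes ps m) (hm : 2 ≤ m) (h1 : 1 < n) (hb : n < m * m) :
    noFactorIn ps n = true ↔ PrimeLike n := by
  obtain ⟨hpw, hmem⟩ := hg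
  have h2 : ∀ p ∈ ps, 2 ≤ p := fun p hp => by
    have := ((hmem p).mp hp).1.1; omega
  rw [noFactorIn_true_iff ps n h2 (hpw.imp le_of_lt)]
  constructor
  · intro hall
    refine ⟨h1, fun d hd hdd hdvd => ?_⟩
    obtain ⟨p, hpl, hpp, hpdvd⟩ := exists_primelike_factor n d h1 hd hdd hdvd
    have hp2 : 2 ≤ p := by have := hpl.1; omega
    have hpm : p < m := by
      by_contra hc
      push_neg at hc
      have hmm : m * m ≤ p * p := mul_le_mul hc hc (by omega) (by omega)
      linarith
    exact hall p ((hmem p).mpr ⟨hpl, hpm⟩) hpp hpdvd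
  · intro hpl p hp hpn
    have hp2 : 2 ≤ p := h2 p hp
    exact hpl.2 p hp2 hpn

theorem buildPrimes_inv : ∀ (k : Nat) (a b : Int) (ps : List Int),
    (b - a).toNat = k → 2 ≤ a → a ≤ b → GoodPrimes ps a →
    GoodPrimes ((PySem.List.pyRange a b 1).foldl stepPrime ps) b := by
  intro k
  induction k using Nat.strong_induction_on with
  | _ k ih =>
    intro a b ps hk ha hab hg
    rcases eq_or_lt_of_le hab with heq | hlt
    · rw [← heq, PySem.List.pyRange_one_eq_nil le_rfl]
      simpa [← heq] using hg
    · rw [PySem.List.pyRange_one_cons hlt, List.foldl_cons]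
      refine ih (b - (a + 1)).toNat (by omega) (a + 1) b (stepPrime ps a) rfl (by omega) (by omega) ?_
      have hiff : noFactorIn ps a = true ↔ PrimeLike a :=
        noFactorIn_iff_primeLike ps a a hg ha (by omega) (by nlinarith [mul_self_nonneg (a - 1)])
      unfold stepPrime
      by_cases hnf : noFactorIn ps a = true
      · rw [if_pos hnf]
        refine ⟨?_, ?_⟩
        · rw [List.pairwise_append]
          refine ⟨hg.1, by simp, ?_⟩
          intro p hp q hq
          rw [List.mem_singleton] at hq
          subst hq
          exact ((hg.2 p).mp hp).2
        · intro p
          rw [List.mem_append, List.mem_singleton, hg.2 p]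
          constructor
          · rintro (⟨hpl, hlt'⟩ | rfl)
            · exact ⟨hpl, by omega⟩
            · exact ⟨hiff.mp hnf, by omega⟩
          · rintro ⟨hpl, hlt'⟩
            by_cases hpa : p = a
            · exact Or.inr hpa
            · exact Or.inl ⟨hpl, by omega⟩
      · rw [if_neg hnf]
        refine ⟨hg.1, fun p => ?_⟩
        rw [hg.2 p]
        constructor
        · rintro ⟨hpl, hlt'⟩; exact ⟨hpl, by omega⟩
        · rintro ⟨hpl, hlt'⟩
          refine ⟨hpl, ?_⟩
          by_cases hpa : p = a
          · exact absurd (hiff.mpr (hpa ▸ hpl)) hnf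
          · omega

theorem sqrtLoop_spec_aux : ∀ (f : Nat) (x l : Int), (x - l).toNat ≤ f →
    l ≤ sqrtLoop f x l ∧ x < (sqrtLoop f x l + 1) * (sqrtLoop f x l + 1) := by
  intro f
  induction f with
  | zero =>
    intro x l hf
    simp only [sqrtLoop]
    refine ⟨le_rfl, ?_⟩
    have hxl : x ≤ l := by omega
    by_cases h0 : 0 ≤ l
    · nlinarith [mul_self_nonneg l]
    · nlinarith [mul_self_nonneg (l + 1)]
  | succ f ih =>
    intro x l hf
    simp only [sqrtLoop]
    by_cases h : (l + 1) * (l + 1) ≤ x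
    · rw [if_pos h]
      have h0 : 0 ≤ x := le_trans (mul_self_nonneg (l + 1)) h
      have h1 : 2 * (l + 1) - 1 ≤ (l + 1) * (l + 1) := by nlinarith [mul_self_nonneg l]
      have hlx : l < x := by
        by_contra hc
        push_neg at hc
        linarith
      have := ih x (l + 1) (by omega)
      exact ⟨by omega, this.2⟩
    · rw [if_neg h]
      exact ⟨le_rfl, not_le.mp h⟩

theorem aux_eq (x limit : Int) (ps : List Int) (hg : GoodPrimes ps (limit + 1))
    (hlim : 1 ≤ limit) (hx : x < (limit + 1) * (limit + 1)) :
    ∀ (f : Nat) (i : Int), checkAux f x i = checkAltAux f x ps i := by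
  intro f
  induction f with
  | zero => intro i; rfl
  | succ f ih =>
    intro i
    simp only [checkAux, checkAltAux, show i * i * 2 = 2 * i * i from by ring]
    by_cases h : 2 * i * i < x
    · rw [if_pos h, if_pos h]
      have hx0 : 0 < x := lt_of_le_of_lt (by nlinarith [mul_self_nonneg i]) h
      have hcand : 1 ≤ x - 2 * i * i := by
        have := Int.lt_iff_add_one_le.mp h
        linarith
      have hcx : x - 2 * i * i ≤ x := by nlinarith [mul_self_nonneg i]
      by_cases hc1 : 1 < x - 2 * i * i
      · have hB : noFactorIn ps (x - 2 * i * i) = true ↔ PrimeLike (x - 2 * i * i) :=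
          noFactorIn_iff_primeLike ps (limit + 1) _ hg (by omega) hc1
            (lt_of_le_of_lt hcx hx)
        have hA := is_prime_true_iff (x - 2 * i * i)
        by_cases hp : PrimeLike (x - 2 * i * i)
        · rw [if_pos (hA.mpr hp),
              if_pos (by rw [Bool.and_eq_true]; exact ⟨by simpa using hc1, hB.mpr hp⟩)]
        · rw [if_neg (fun hh => hp (hA.mp hh)),
              if_neg (by rw [Bool.and_eq_true]; rintro ⟨-, hnf⟩; exact hp (hB.mp hnf))]
          exact ih (i + 1)
      · have hc1' : x - 2 * i * i = 1 := le_antisymm (not_lt.mp hc1) hcand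
        rw [hc1']
        have hnp1 : ¬ (is_prime 1 = true) := fun hh => by
          have h11 := ((is_prime_true_iff 1).mp hh).1
          omega
        rw [if_neg hnp1, if_neg (by simp)]
        exact ih (i + 1)
    · rw [if_neg h, if_neg h]

-- ===== VERDICT (by name: the statement is the Claim_ definition above) =====
theorem check_spec : Claim_equal_check := by
  intro x _
  unfold Spec_check check check_alt
  by_cases hx : x ≤ 0
  · rw [if_pos hx]
    have : x.toNat = 0 := by omega
    rw [this]
    rfl
  · rw [if_neg hx]
    push_neg at hx
    have hs := sqrtLoop_spec_aux (x - 1).toNat x 1 le_rfl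
    have h1 : 1 ≤ sqrtLoop (x - 1).toNat x 1 := hs.1
    have h2 := hs.2
    have hg : GoodPrimes (buildPrimes (sqrtLoop (x - 1).toNat x 1))
        (sqrtLoop (x - 1).toNat x 1 + 1) := by
      refine buildPrimes_inv (sqrtLoop (x - 1).toNat x 1 + 1 - 2).toNat 2
        (sqrtLoop (x - 1).toNat x 1 + 1) [] rfl (by omega) (by omega)
        ⟨List.Pairwise.nil, fun p => ?_⟩
      simp only [List.not_mem_nil, false_iff]
      rintro ⟨⟨hp1, -⟩, hp2⟩
      omega
    exact aux_eq x (sqrtLoop (x - 1).toNat x 1) _ hg h1 h2 x.toNat 0
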